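-- pv_equiv track=rewrite | github.com/Zac-HD/tic-tac-tournament | agents/mp_agent.py | open_twin
-- ===== SOURCE A (Python) =====
-- def open_twin_in_row(board, row, player):
--     """ is there an open twin for the player indicated in the row? """
--     return (count_player_row(board, player, row) == 2 and count_player_row(board, '.', row) == 1 )
--
-- def open_twin_in_col(board, col, player):
--     """ is there an open twin for the player indicated in the column? """
--     return (count_player_column(board, player, col) == 2 and count_player_column(board, '.', col) == 1 )
--
-- def open_twin_in_diag1(board, player):
--     """ is there an open twin for the player indicated in the right diagonal? """
--     return (count_player_diag1(board, player) == 2 and count_player_diag1(board, '.') == 1 )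
--
-- def open_twin_in_diag2(board, player):
--     """ is there an open twin for the player indicated in the left diagonal? """
--     return (count_player_diag2(board, player) == 2 and count_player_diag2(board, '.') == 1 )
--
-- def open_twin(board,player):
--     """ is there an open twin for the player indicated anywhere on the board? """
--     # is there an open twin (we need to win or block)
--     # do we answer true, or calculate the position, or make the move
--     # we will just answer the question for now
--     for i in range(len(board[0])) :
--         if (open_twin_in_row(board,i,player)):
--             return True
--
--     for j in range(len(board[1])) :
--         if (open_twin_in_col(board,j,player)):
--             return True
--
--     if (open_twin_in_diag1(board,player)):
--         return True
--
--     if (open_twin_in_diag2(board,player)):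
--         return True
--     return False
--
-- def count_player_row(board, player, row):
--     """Again poorly and inconsistently named - - this function returns the number of pieces on the board
--     in the indicated row for the given player"""
--     # return the number of player counters on the board
--     count_p = 0
--     for j in range(len(board[1])) :
--         if (board[row][j] == player):
--             count_p += 1
--     return count_p
--
-- def count_player_column(board, player, col):
--     """Again poorly and inconsistently named - - this function returns the number of pieces on the board
--     in the indicated column for the given player"""
--     # return the number of player counters on the board
--     count_p = 0
--     for i in range(len(board[0])) :
--         if (board[i][col] == player):
--             count_p += 1
--     return count_p
--
-- def count_player_diag1(board, player):
--     """Again poorly and inconsistently named - - this function returns the number of pieces on the board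
--     in the right diagonal for the given player"""
--     # return the number of player counters on the board
--     count_p = 0
--     row = 0
--     col = 0
--     for i in range(len(board[0])) :
--         if (board[row][col] == player):
--             count_p += 1
--         row += 1
--         col += 1
--     return count_p
--
-- def count_player_diag2(board, player):
--     """Again poorly and inconsistently named - - this function returns the number of pieces on the board
--     in the left diagonal for the given player"""
--     # return the number of player counters on the board
--     count_p = 0
--     row = 0
--     col = len(board[1]) - 1
--     for i in range(len(board[1])) :
--         if (board[row][col] == player):
--             count_p += 1
--         row += 1
--         col -= 1
--     return count_p
-- ===== SOURCE B (Python) =====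
-- def open_twin(board, player):
--     """ is there an open twin for the player indicated anywhere on the board? """
--     n0 = len(board[0])
--     n1 = len(board[1])
--     col_p = {}
--     col_e = {}
--     for i in range(n0):
--         row_p = 0
--         row_e = 0
--         for j in range(n1):
--             c = board[i][j]
--             if c == player:
--                 row_p += 1
--                 col_p[j] = col_p.get(j, 0) + 1
--             elif c == '.':
--                 row_e += 1
--                 col_e[j] = col_e.get(j, 0) + 1
--         if row_p == 2 and row_e == 1:
--             return True
--     for j in range(n1):
--         if col_p.get(j, 0) == 2 and col_e.get(j, 0) == 1:
--             return True
--     d_p = 0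
--     d_e = 0
--     for k in range(n0):
--         c = board[k][k]
--         if c == player:
--             d_p += 1
--         elif c == '.':
--             d_e += 1
--     if d_p == 2 and d_e == 1:
--         return True
--     d_p = 0
--     d_e = 0
--     for k in range(n1):
--         c = board[k][n1 - 1 - k]
--         if c == player:
--             d_p += 1
--         elif c == '.':
--             d_e += 1
--     return d_p == 2 and d_e == 1
-- ===== Notes on version B (the rewrite author's own statement) =====
-- stated objective: alternative
-- what changed: B replaces A's four per-line counting helpers (each line scanned twice, the whole grid rescanned for the column phase) by a single accumulation pass over the grid that maintains row counters and per-column counter tables (dicts), deciding each row as its scan completes and all columns from the tables afterwards, then counts each diagonal in one scan with an if/elif instead of two counting passes.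
-- outside the precondition, e.g. on open_twin([['x', 'x', '.'], ['.', 'o', 'o']], 'x'): A returns True, B returns True
import Mathlib
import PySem

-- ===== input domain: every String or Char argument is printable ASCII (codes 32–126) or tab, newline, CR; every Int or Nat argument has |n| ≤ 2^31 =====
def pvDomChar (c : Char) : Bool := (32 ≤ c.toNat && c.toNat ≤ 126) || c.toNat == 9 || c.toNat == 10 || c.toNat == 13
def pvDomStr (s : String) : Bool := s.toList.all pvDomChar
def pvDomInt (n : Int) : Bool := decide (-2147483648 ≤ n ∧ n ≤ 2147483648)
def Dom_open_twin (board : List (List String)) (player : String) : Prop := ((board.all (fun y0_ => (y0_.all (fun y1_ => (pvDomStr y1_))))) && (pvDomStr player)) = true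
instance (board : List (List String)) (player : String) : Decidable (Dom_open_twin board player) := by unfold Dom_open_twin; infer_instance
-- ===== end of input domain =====

-- B replaces A's per-line rescanning helpers by one accumulation pass with row counters and
-- per-column counter tables (objective: alternative decomposition, same asymptotic cost).

-- ===== PORT A =====

def count_player_row (board : List (List String)) (player : String) (row : Int) : Int :=
  (PySem.List.pyRange 0 ((PySem.List.pyGetD board 1 []).length : Int) 1).foldl
    (fun count_p j =>
      if PySem.List.pyGetD (PySem.List.pyGetD board row []) j "" == player then count_p + 1
      else count_p) 0

def count_player_column (board : List (List String)) (player : String) (col : Int) : Int :=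
  (PySem.List.pyRange 0 ((PySem.List.pyGetD board 0 []).length : Int) 1).foldl
    (fun count_p i =>
      if PySem.List.pyGetD (PySem.List.pyGetD board i []) col "" == player then count_p + 1
      else count_p) 0

-- the diag loops keep Python's explicit row/col counters as fold state
def count_player_diag1 (board : List (List String)) (player : String) : Int :=
  ((PySem.List.pyRange 0 ((PySem.List.pyGetD board 0 []).length : Int) 1).foldl
    (fun (s : Int × Int × Int) _ =>
      (if PySem.List.pyGetD (PySem.List.pyGetD board s.2.1 []) s.2.2 "" == player then s.1 + 1
       else s.1, s.2.1 + 1, s.2.2 + 1)) (0, 0, 0)).1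

def count_player_diag2 (board : List (List String)) (player : String) : Int :=
  ((PySem.List.pyRange 0 ((PySem.List.pyGetD board 1 []).length : Int) 1).foldl
    (fun (s : Int × Int × Int) _ =>
      (if PySem.List.pyGetD (PySem.List.pyGetD board s.2.1 []) s.2.2 "" == player then s.1 + 1
       else s.1, s.2.1 + 1, s.2.2 - 1)) (0, 0, ((PySem.List.pyGetD board 1 []).length : Int) - 1)).1

def open_twin_in_row (board : List (List String)) (row : Int) (player : String) : Bool :=
  count_player_row board player row == 2 && count_player_row board "." row == 1

def open_twin_in_col (board : List (List String)) (col : Int) (player : String) : Bool :=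
  count_player_column board player col == 2 && count_player_column board "." col == 1

def open_twin_in_diag1 (board : List (List String)) (player : String) : Bool :=
  count_player_diag1 board player == 2 && count_player_diag1 board "." == 1

def open_twin_in_diag2 (board : List (List String)) (player : String) : Bool :=
  count_player_diag2 board player == 2 && count_player_diag2 board "." == 1

def open_twin (board : List (List String)) (player : String) : Bool :=
  if (PySem.List.pyRange 0 ((PySem.List.pyGetD board 0 []).length : Int) 1).any
       (fun i => open_twin_in_row board i player) then true
  else if (PySem.List.pyRange 0 ((PySem.List.pyGetD board 1 []).length : Int) 1).any
       (fun j => open_twin_in_col board j player) then true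
  else if open_twin_in_diag1 board player then true
  else if open_twin_in_diag2 board player then true
  else false

-- ===== PORT B =====

-- single pass over the rectangle: state = (col_p table, col_e table, row phase found a twin);
-- inner state = (row_p, row_e, col_p, col_e); Python's `d[j] = d.get(j,0)+1` is Dict.modify
def open_twin_alt (board : List (List String)) (player : String) : Bool :=
  let n0 : Int := ((PySem.List.pyGetD board 0 []).length : Int)
  let n1 : Int := ((PySem.List.pyGetD board 1 []).length : Int)
  let s := (PySem.List.pyRange 0 n0 1).foldl
    (fun (s : PySem.Dict Int Int × PySem.Dict Int Int × Bool) i =>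
      let t := (PySem.List.pyRange 0 n1 1).foldl
        (fun (t : Int × Int × PySem.Dict Int Int × PySem.Dict Int Int) j =>
          let c := PySem.List.pyGetD (PySem.List.pyGetD board i []) j ""
          if c == player then (t.1 + 1, t.2.1, (t.2.2.1).modify j 0 (· + 1), t.2.2.2)
          else if c == "." then (t.1, t.2.1 + 1, t.2.2.1, (t.2.2.2).modify j 0 (· + 1))
          else t)
        (0, 0, s.1, s.2.1)
      (t.2.2.1, t.2.2.2, s.2.2 || (t.1 == 2 && t.2.1 == 1)))
    (PySem.Dict.empty, PySem.Dict.empty, false)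
  if s.2.2 then true
  else if (PySem.List.pyRange 0 n1 1).any
      (fun j => s.1.getD j 0 == 2 && s.2.1.getD j 0 == 1) then true
  else
    let d1 := (PySem.List.pyRange 0 n0 1).foldl
      (fun (d : Int × Int) k =>
        let c := PySem.List.pyGetD (PySem.List.pyGetD board k []) k ""
        if c == player then (d.1 + 1, d.2)
        else if c == "." then (d.1, d.2 + 1)
        else d) (0, 0)
    if d1.1 == 2 && d1.2 == 1 then true
    else
      let d2 := (PySem.List.pyRange 0 n1 1).foldl
        (fun (d : Int × Int) k =>
          let c := PySem.List.pyGetD (PySem.List.pyGetD board k []) (n1 - 1 - k) ""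
          if c == player then (d.1 + 1, d.2)
          else if c == "." then (d.1, d.2 + 1)
          else d) (0, 0)
      d2.1 == 2 && d2.2 == 1

-- ===== PRECONDITION & SPEC =====

-- Pre_ excludes short/ragged boards on which the fixed scan region (taken from len(board[0]) and
-- len(board[1])) indexes out of range: on those the two Pythons still behave identically (both
-- raise IndexError at the same access, or both return True when a row twin is found before it),
-- but a raise cannot be represented by the total getD-default Lean ports.
def Pre_open_twin (board : List (List String)) (player : String) : Prop :=
  2 ≤ board.length ∧
  max (board.getD 0 []).length (board.getD 1 []).length ≤ board.length ∧
  (∀ k < (board.getD 0 []).length, max (board.getD 1 []).length (k + 1) ≤ (board.getD k []).length) ∧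
  (∀ k < (board.getD 1 []).length, (board.getD 1 []).length - k ≤ (board.getD k []).length)

instance (board : List (List String)) (player : String) : Decidable (Pre_open_twin board player) := by
  unfold Pre_open_twin; infer_instance

def pvWitness_open_twin : List (List String) × String :=
  ([["x", "x", "."], [".", "o", "o"], [".", ".", "."]], "x")

def Spec_open_twin (board : List (List String)) (player : String) (out : Bool) : Prop := out = open_twin_alt board player
instance (board : List (List String)) (player : String) (out : Bool) : Decidable (Spec_open_twin board player out) := by unfold Spec_open_twin; infer_instance

-- ===== CLAIM (what is proved, stated in full; the proofs are below) =====
def Claim_equal_open_twin : Prop := ∀ (board : List (List String)) (player : String), Dom_open_twin board player → Pre_open_twin board player → Spec_open_twin board player (open_twin board player)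

-- ===== LEMMAS AND PROOFS =====


-- Int-cast bridge for the ==2 / ==1 tests
theorem pv_beq_cast (n m : Nat) : (((n : Int)) == ((m : Nat) : Int)) = (n == m) := by
  simp [beq_eq_decide, Nat.cast_inj]

-- any respects pointwise-on-members equality
theorem pv_any_congr {A : Type} (l : List A) (f g : A → Bool)
    (h : ∀ x ∈ l, f x = g x) : l.any f = l.any g := by
  induction l with
  | nil => rfl
  | cons x t ih =>
    simp only [List.any_cons, h x (by simp), ih (fun y hy => h y (by simp [hy]))]

-- A's counting fold over a range equals list.count of the materialized line
theorem pv_count_fold_eq (f : Int → String) (p : String) (n : Int) :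
    (PySem.List.pyRange 0 n 1).foldl (fun c j => if f j == p then c + 1 else c) 0
      = (PySem.List.count ((PySem.List.pyRange 0 n 1).map f) p : Int) := by
  rw [PySem.List.foldl_count_if (fun j => f j == p) (PySem.List.pyRange 0 n 1) 0]
  simp [PySem.List.count_eq, List.count_eq_countP, List.countP_map, Function.comp_def]

theorem pv_row_eq (board : List (List String)) (player : String) (i : Int) :
    open_twin_in_row board i player
      = (PySem.List.count
            ((PySem.List.pyRange 0 ((PySem.List.pyGetD board 1 []).length : Int) 1).map
              (fun j => PySem.List.pyGetD (PySem.List.pyGetD board i []) j "")) player == 2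
          && PySem.List.count
            ((PySem.List.pyRange 0 ((PySem.List.pyGetD board 1 []).length : Int) 1).map
              (fun j => PySem.List.pyGetD (PySem.List.pyGetD board i []) j "")) "." == 1) := by
  unfold open_twin_in_row count_player_row
  rw [pv_count_fold_eq, pv_count_fold_eq,
    show ((2:Int)) = (((2:Nat) : Int)) from rfl, show ((1:Int)) = (((1:Nat) : Int)) from rfl,
    pv_beq_cast, pv_beq_cast]

theorem pv_col_eq (board : List (List String)) (player : String) (j : Int) :
    open_twin_in_col board j player
      = (PySem.List.count
            ((PySem.List.pyRange 0 ((PySem.List.pyGetD board 0 []).length : Int) 1).map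
              (fun i => PySem.List.pyGetD (PySem.List.pyGetD board i []) j "")) player == 2
          && PySem.List.count
            ((PySem.List.pyRange 0 ((PySem.List.pyGetD board 0 []).length : Int) 1).map
              (fun i => PySem.List.pyGetD (PySem.List.pyGetD board i []) j "")) "." == 1) := by
  unfold open_twin_in_col count_player_column
  rw [pv_count_fold_eq, pv_count_fold_eq,
    show ((2:Int)) = (((2:Nat) : Int)) from rfl, show ((1:Int)) = (((1:Nat) : Int)) from rfl,
    pv_beq_cast, pv_beq_cast]

-- the diag fold with explicit row/col counters counts the cells at (r+k, cl+d*k)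
theorem pv_diag_fold_eq (board : List (List String)) (p : String) (d : Int) :
    ∀ (l : List Int) (c r cl : Int),
    (l.foldl
      (fun (s : Int × Int × Int) _ =>
        (if PySem.List.pyGetD (PySem.List.pyGetD board s.2.1 []) s.2.2 "" == p then s.1 + 1
         else s.1, s.2.1 + 1, s.2.2 + d)) (c, r, cl)).1
      = c + (((List.range l.length).map
              (fun k : Nat => PySem.List.pyGetD (PySem.List.pyGetD board (r + (k : Int)) []) (cl + d * (k : Int)) "")).count p : Int) := by
  intro l
  induction l with
  | nil => intro c r cl; simp
  | cons x t ih =>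
    intro c r cl
    rw [List.foldl_cons, ih, List.length_cons, List.range_succ_eq_map, List.map_cons,
      List.map_map, List.count_cons]
    have hmap :
        (List.range t.length).map
            ((fun k : Nat => PySem.List.pyGetD (PySem.List.pyGetD board (r + (k : Int)) []) (cl + d * (k : Int)) "") ∘ Nat.succ)
          = (List.range t.length).map
            (fun k : Nat => PySem.List.pyGetD (PySem.List.pyGetD board ((r + 1) + (k : Int)) []) ((cl + d) + d * (k : Int)) "") := by
      apply List.map_congr_left
      intro k _
      have h1 : r + ((Nat.succ k : Nat) : Int) = (r + 1) + (k : Int) := by push_cast; ring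
      have h2 : cl + d * ((Nat.succ k : Nat) : Int) = (cl + d) + d * (k : Int) := by push_cast; ring
      simp only [Function.comp, h1, h2]
    rw [hmap]
    have h0 : PySem.List.pyGetD (PySem.List.pyGetD board (r + ((0:Nat) : Int)) []) (cl + d * ((0:Nat) : Int)) ""
        = PySem.List.pyGetD (PySem.List.pyGetD board r []) cl "" := by norm_num
    rw [h0]
    by_cases h : PySem.List.pyGetD (PySem.List.pyGetD board r []) cl "" == p
    · simp only [h, if_pos]
      push_cast
      ring
    · simp only [h, Bool.false_eq_true, if_false]
      push_cast
      ring

theorem pv_diag1_eq (board : List (List String)) (player : String) :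
    open_twin_in_diag1 board player
      = (PySem.List.count
            ((PySem.List.pyRange 0 ((PySem.List.pyGetD board 0 []).length : Int) 1).map
              (fun k => PySem.List.pyGetD (PySem.List.pyGetD board k []) k "")) player == 2
          && PySem.List.count
            ((PySem.List.pyRange 0 ((PySem.List.pyGetD board 0 []).length : Int) 1).map
              (fun k => PySem.List.pyGetD (PySem.List.pyGetD board k []) k "")) "." == 1) := by
  have key : ∀ p : String, count_player_diag1 board p
      = (PySem.List.count
          ((PySem.List.pyRange 0 ((PySem.List.pyGetD board 0 []).length : Int) 1).map
            (fun k => PySem.List.pyGetD (PySem.List.pyGetD board k []) k "")) p : Int) := by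
    intro p
    unfold count_player_diag1
    rw [pv_diag_fold_eq board p 1 (PySem.List.pyRange 0 ((PySem.List.pyGetD board 0 []).length : Int) 1) 0 0 0]
    simp [PySem.List.count_eq, PySem.List.pyRange_zero_nat, List.map_map, Function.comp_def]
  unfold open_twin_in_diag1
  rw [key, key,
    show ((2:Int)) = (((2:Nat) : Int)) from rfl, show ((1:Int)) = (((1:Nat) : Int)) from rfl,
    pv_beq_cast, pv_beq_cast]

theorem pv_diag2_eq (board : List (List String)) (player : String) :
    open_twin_in_diag2 board player
      = (PySem.List.count
            ((PySem.List.pyRange 0 ((PySem.List.pyGetD board 1 []).length : Int) 1).map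
              (fun k => PySem.List.pyGetD (PySem.List.pyGetD board k [])
                (((PySem.List.pyGetD board 1 []).length : Int) - 1 - k) "")) player == 2
          && PySem.List.count
            ((PySem.List.pyRange 0 ((PySem.List.pyGetD board 1 []).length : Int) 1).map
              (fun k => PySem.List.pyGetD (PySem.List.pyGetD board k [])
                (((PySem.List.pyGetD board 1 []).length : Int) - 1 - k) "")) "." == 1) := by
  have key : ∀ p : String, count_player_diag2 board p
      = (PySem.List.count
          ((PySem.List.pyRange 0 ((PySem.List.pyGetD board 1 []).length : Int) 1).map
            (fun k => PySem.List.pyGetD (PySem.List.pyGetD board k [])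
              (((PySem.List.pyGetD board 1 []).length : Int) - 1 - k) "")) p : Int) := by
    intro p
    unfold count_player_diag2
    simp only [sub_eq_add_neg]
    rw [pv_diag_fold_eq board p (-1) (PySem.List.pyRange 0 ((PySem.List.pyGetD board 1 []).length : Int) 1) 0 0
      (((PySem.List.pyGetD board 1 []).length : Int) + -1)]
    simp only [PySem.List.count_eq, PySem.List.pyRange_zero_nat, List.map_map, Function.comp_def,
      List.length_map, List.length_range, zero_add, neg_mul, one_mul]
  unfold open_twin_in_diag2
  rw [key, key,
    show ((2:Int)) = (((2:Nat) : Int)) from rfl, show ((1:Int)) = (((1:Nat) : Int)) from rfl,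
    pv_beq_cast, pv_beq_cast]

theorem pv_if_chain (a b c d : Bool) :
    (if a then true else if b then true else if c then true else if d then true else false)
      = (a || b || c || d) := by
  cases a <;> cases b <;> cases c <;> cases d <;> rfl

theorem pv_if_chain' (a b c d : Bool) :
    (if a then true else if b then true else if c then true else d)
      = (a || b || c || d) := by
  cases a <;> cases b <;> cases c <;> rfl

-- B-side: single-scan pair fold counts both targets at once
theorem pv_pair_fold (player : String) (f : Int → String) (js : List Int) :
    ∀ (a b : Int),
    js.foldl (fun (d : Int × Int) k =>
        if f k == player then (d.1 + 1, d.2)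
        else if f k == "." then (d.1, d.2 + 1) else d) (a, b)
      = (a + ((js.map f).countP (fun c => c == player) : Int),
         b + ((js.map f).countP (fun c => !(c == player) && c == ".") : Int)) := by
  induction js with
  | nil => intro a b; simp
  | cons x t ih =>
    intro a b
    simp only [List.foldl_cons, List.map_cons, List.countP_cons]
    by_cases h1 : f x == player
    · simp only [h1, if_true, ih, Bool.not_true, Bool.false_and, Prod.mk.injEq]
      constructor <;> push_cast <;> simp <;> try ring
    · simp only [h1, Bool.false_eq_true, if_false, Bool.not_false, Bool.true_and]
      by_cases h2 : f x == "."
      · simp only [h2, if_true, ih, Prod.mk.injEq]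
        constructor <;> push_cast <;> simp <;> try ring
      · simp only [h2, Bool.false_eq_true, if_false, ih, Prod.mk.injEq]
        constructor <;> push_cast <;> simp <;> try ring

-- per-line bridge: single-scan (player, open) countP pair vs A's two counts
theorem pv_cond_eq (player : String) (xs : List String) :
    ((((xs.countP (fun c => c == player) : Nat) : Int) == 2)
        && (((xs.countP (fun c => !(c == player) && c == ".") : Nat) : Int) == 1))
      = (PySem.List.count xs player == 2 && PySem.List.count xs "." == 1) := by
  by_cases hp : player = "."
  · subst hp
    have h0 : xs.countP (fun c => !(c == ".") && c == ".") = 0 := by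
      apply List.countP_eq_zero.mpr
      intro c _
      by_cases h : c == "." <;> simp [h]
    rw [h0]
    have : (((0:Nat) : Int) == 1) = false := by decide
    rw [this, Bool.and_false]
    rcases eq_or_ne (List.count "." xs) 2 with h2 | h2
    · simp [h2]
    · simp [beq_iff_eq, h2]
  · have hcnt : xs.countP (fun c => c == player) = List.count player xs :=
      List.count_eq_countP.symm
    have hq : xs.countP (fun c => !(c == player) && c == ".") = List.count "." xs := by
      rw [List.count_eq_countP]
      apply List.countP_congr
      intro c _
      by_cases hc : c = "."
      · subst hc
        have : ("." == player) = false := by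
          simp only [beq_eq_false_iff_ne, ne_eq]
          exact fun h => hp h.symm
        simp [this]
      · simp [beq_iff_eq, hc]
    rw [hcnt, hq]
    simp only [PySem.List.count_eq]
    rw [show ((2:Int)) = (((2:Nat) : Int)) from rfl, show ((1:Int)) = (((1:Nat) : Int)) from rfl,
      pv_beq_cast, pv_beq_cast]

-- B's inner row scan: row counters become countP of the row line, column tables become
-- folds over the filtered index list
theorem pv_inner_fold (board : List (List String)) (player : String) (i : Int) :
    ∀ (js : List Int) (rP rE : Int) (dP dE : PySem.Dict Int Int),
    js.foldl
        (fun (t : Int × Int × PySem.Dict Int Int × PySem.Dict Int Int) j =>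
          if PySem.List.pyGetD (PySem.List.pyGetD board i []) j "" == player then
            (t.1 + 1, t.2.1, (t.2.2.1).modify j 0 (· + 1), t.2.2.2)
          else if PySem.List.pyGetD (PySem.List.pyGetD board i []) j "" == "." then
            (t.1, t.2.1 + 1, t.2.2.1, (t.2.2.2).modify j 0 (· + 1))
          else t)
        (rP, rE, dP, dE)
      = (rP + ((js.map (fun j => PySem.List.pyGetD (PySem.List.pyGetD board i []) j "")).countP (fun c => c == player) : Int),
         rE + ((js.map (fun j => PySem.List.pyGetD (PySem.List.pyGetD board i []) j "")).countP (fun c => !(c == player) && c == ".") : Int),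
         (js.filter (fun j => PySem.List.pyGetD (PySem.List.pyGetD board i []) j "" == player)).foldl
           (fun d j => d.modify j 0 (· + 1)) dP,
         (js.filter (fun j => !(PySem.List.pyGetD (PySem.List.pyGetD board i []) j "" == player)
             && PySem.List.pyGetD (PySem.List.pyGetD board i []) j "" == ".")).foldl
           (fun d j => d.modify j 0 (· + 1)) dE) := by
  intro js
  induction js with
  | nil => intro rP rE dP dE; simp
  | cons x t ih =>
    intro rP rE dP dE
    simp only [List.foldl_cons, List.map_cons, List.countP_cons, List.filter_cons]
    by_cases h1 : PySem.List.pyGetD (PySem.List.pyGetD board i []) x "" == player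
    · simp only [h1, if_true, Bool.not_true, Bool.false_and, ih, Prod.mk.injEq]
      and_intros <;> first | trivial | (push_cast; simp; try ring)
    · simp only [h1, Bool.false_eq_true, if_false, Bool.not_false, Bool.true_and]
      by_cases h2 : PySem.List.pyGetD (PySem.List.pyGetD board i []) x "" == "."
      · simp only [h2, if_true, ih, Prod.mk.injEq]
        and_intros <;> first | trivial | (push_cast; simp; try ring)
      · simp only [h2, Bool.false_eq_true, if_false, ih, Prod.mk.injEq]
        and_intros <;> first | trivial | (push_cast; simp; try ring)

-- B's outer pass: the found-flag is the OR of the row conditions, the tables are the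
-- accumulated per-row filtered folds
theorem pv_outer_fold (board : List (List String)) (player : String) (m : Int) :
    ∀ (is : List Int) (dP dE : PySem.Dict Int Int) (b : Bool),
    is.foldl
        (fun (s : PySem.Dict Int Int × PySem.Dict Int Int × Bool) i =>
          let t := (PySem.List.pyRange 0 m 1).foldl
            (fun (t : Int × Int × PySem.Dict Int Int × PySem.Dict Int Int) j =>
              if PySem.List.pyGetD (PySem.List.pyGetD board i []) j "" == player then
                (t.1 + 1, t.2.1, (t.2.2.1).modify j 0 (· + 1), t.2.2.2)
              else if PySem.List.pyGetD (PySem.List.pyGetD board i []) j "" == "." then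
                (t.1, t.2.1 + 1, t.2.2.1, (t.2.2.2).modify j 0 (· + 1))
              else t)
            (0, 0, s.1, s.2.1)
          (t.2.2.1, t.2.2.2, s.2.2 || (t.1 == 2 && t.2.1 == 1)))
        (dP, dE, b)
      = (is.foldl
           (fun d i => ((PySem.List.pyRange 0 m 1).filter
               (fun j => PySem.List.pyGetD (PySem.List.pyGetD board i []) j "" == player)).foldl
             (fun d j => d.modify j 0 (· + 1)) d) dP,
         is.foldl
           (fun d i => ((PySem.List.pyRange 0 m 1).filter
               (fun j => !(PySem.List.pyGetD (PySem.List.pyGetD board i []) j "" == player)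
                 && PySem.List.pyGetD (PySem.List.pyGetD board i []) j "" == ".")).foldl
             (fun d j => d.modify j 0 (· + 1)) d) dE,
         b || is.any (fun i =>
           ((((PySem.List.pyRange 0 m 1).map (fun j => PySem.List.pyGetD (PySem.List.pyGetD board i []) j "")).countP (fun c => c == player) : Int) == 2)
           && ((((PySem.List.pyRange 0 m 1).map (fun j => PySem.List.pyGetD (PySem.List.pyGetD board i []) j "")).countP (fun c => !(c == player) && c == ".") : Int) == 1))) := by
  intro is
  induction is with
  | nil => intro dP dE b; simp
  | cons x t ih =>
    intro dP dE b
    simp only [List.foldl_cons, List.any_cons]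
    rw [pv_inner_fold board player x (PySem.List.pyRange 0 m 1) 0 0 dP dE]
    simp only [zero_add]
    rw [ih]
    simp only [Bool.or_assoc]

-- getD after accumulating the per-row filtered folds = occurrences over the rows
theorem pv_getD_nested_p (board : List (List String)) (player : String) (js : List Int) :
    ∀ (is : List Int) (d : PySem.Dict Int Int) (v : Int),
    (is.foldl (fun d i => ((js.filter
          (fun j => PySem.List.pyGetD (PySem.List.pyGetD board i []) j "" == player)).foldl
        (fun d j => d.modify j 0 (· + 1)) d)) d).getD v 0
      = d.getD v 0 + ((is.flatMap (fun i => js.filter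
          (fun j => PySem.List.pyGetD (PySem.List.pyGetD board i []) j "" == player))).count v : Int) := by
  intro is
  induction is with
  | nil => intro d v; simp
  | cons x t ih =>
    intro d v
    simp only [List.foldl_cons, List.flatMap_cons, List.count_append]
    rw [ih, PySem.Dict.getD_foldl_modify_add_one]
    push_cast
    ring

theorem pv_getD_nested_q (board : List (List String)) (player : String) (js : List Int) :
    ∀ (is : List Int) (d : PySem.Dict Int Int) (v : Int),
    (is.foldl (fun d i => ((js.filter
          (fun j => !(PySem.List.pyGetD (PySem.List.pyGetD board i []) j "" == player)
            && PySem.List.pyGetD (PySem.List.pyGetD board i []) j "" == ".")).foldl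
        (fun d j => d.modify j 0 (· + 1)) d)) d).getD v 0
      = d.getD v 0 + ((is.flatMap (fun i => js.filter
          (fun j => !(PySem.List.pyGetD (PySem.List.pyGetD board i []) j "" == player)
            && PySem.List.pyGetD (PySem.List.pyGetD board i []) j "" == "."))).count v : Int) := by
  intro is
  induction is with
  | nil => intro d v; simp
  | cons x t ih =>
    intro d v
    simp only [List.foldl_cons, List.flatMap_cons, List.count_append]
    rw [ih, PySem.Dict.getD_foldl_modify_add_one]
    push_cast
    ring

-- counting one index in a filtered range: 1 if the index passes the filter, else 0
theorem pv_count_filter_range (m : Int) (k : Nat) (hk : (k : Int) < m) (pr : Int → Bool) :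
    ((PySem.List.pyRange 0 m 1).filter pr).count ((k : Int))
      = (if pr (k : Int) then 1 else 0) := by
  have hmem : (k : Int) ∈ PySem.List.pyRange 0 m 1 := by
    rw [PySem.List.pyRange_zero]
    refine List.mem_map.mpr ⟨k, ?_, rfl⟩
    refine List.mem_range.mpr ?_
    omega
  have hnd : (PySem.List.pyRange 0 m 1).Nodup := by
    rw [PySem.List.pyRange_zero]
    exact (List.nodup_range).map (fun a b h => by exact_mod_cast h)
  by_cases h : pr ((k : Int)) = true
  · rw [if_pos h, List.count_filter h]
    exact List.count_eq_one_of_mem hnd hmem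
  · rw [if_neg h]
    refine List.count_eq_zero.mpr ?_
    intro hmemf
    exact h (List.of_mem_filter hmemf)

-- occurrences of one column index over the per-row filtered lists = countP over the rows
theorem pv_flatMap_count_p (board : List (List String)) (player : String) (m : Int)
    (k : Nat) (hk : (k : Int) < m) :
    ∀ (is : List Int),
    (((is.flatMap (fun i => (PySem.List.pyRange 0 m 1).filter
          (fun j => PySem.List.pyGetD (PySem.List.pyGetD board i []) j "" == player))).count ((k : Int))) : Nat)
      = is.countP (fun i => PySem.List.pyGetD (PySem.List.pyGetD board i []) ((k : Int)) "" == player) := by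
  intro is
  induction is with
  | nil => simp
  | cons x t ih =>
    simp only [List.flatMap_cons, List.count_append, List.countP_cons, ih,
      pv_count_filter_range m k hk
        (fun j => PySem.List.pyGetD (PySem.List.pyGetD board x []) j "" == player)]
    by_cases h : PySem.List.pyGetD (PySem.List.pyGetD board x []) ((k : Int)) "" == player <;>
      simp [h] <;> omega

theorem pv_flatMap_count_q (board : List (List String)) (player : String) (m : Int)
    (k : Nat) (hk : (k : Int) < m) :
    ∀ (is : List Int),
    (((is.flatMap (fun i => (PySem.List.pyRange 0 m 1).filter
          (fun j => !(PySem.List.pyGetD (PySem.List.pyGetD board i []) j "" == player)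
            && PySem.List.pyGetD (PySem.List.pyGetD board i []) j "" == "."))).count ((k : Int))) : Nat)
      = is.countP (fun i => !(PySem.List.pyGetD (PySem.List.pyGetD board i []) ((k : Int)) "" == player)
          && PySem.List.pyGetD (PySem.List.pyGetD board i []) ((k : Int)) "" == ".") := by
  intro is
  induction is with
  | nil => simp
  | cons x t ih =>
    simp only [List.flatMap_cons, List.count_append, List.countP_cons, ih,
      pv_count_filter_range m k hk
        (fun j => !(PySem.List.pyGetD (PySem.List.pyGetD board x []) j "" == player)
          && PySem.List.pyGetD (PySem.List.pyGetD board x []) j "" == ".")]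
    by_cases h : (!(PySem.List.pyGetD (PySem.List.pyGetD board x []) ((k : Int)) "" == player)
        && PySem.List.pyGetD (PySem.List.pyGetD board x []) ((k : Int)) "" == ".") = true <;>
      simp [h] <;> omega

theorem pv_countP_col_p (board : List (List String)) (player : String) (j : Int) (is : List Int) :
    is.countP (fun i => PySem.List.pyGetD (PySem.List.pyGetD board i []) j "" == player)
      = (is.map (fun i => PySem.List.pyGetD (PySem.List.pyGetD board i []) j "")).countP (fun c => c == player) := by
  rw [List.countP_map]; rfl

theorem pv_countP_col_q (board : List (List String)) (player : String) (j : Int) (is : List Int) :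
    is.countP (fun i => !(PySem.List.pyGetD (PySem.List.pyGetD board i []) j "" == player)
        && PySem.List.pyGetD (PySem.List.pyGetD board i []) j "" == ".")
      = (is.map (fun i => PySem.List.pyGetD (PySem.List.pyGetD board i []) j "")).countP
          (fun c => !(c == player) && c == ".") := by
  rw [List.countP_map]; rfl

theorem open_twin_eq_alt (board : List (List String)) (player : String) :
    open_twin board player = open_twin_alt board player := by
  simp only [open_twin, open_twin_alt]
  rw [pv_if_chain]
  rw [pv_outer_fold]
  rw [pv_if_chain']
  simp only [Bool.false_or]
  rw [pv_pair_fold player (fun k => PySem.List.pyGetD (PySem.List.pyGetD board k []) k "")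
    (PySem.List.pyRange 0 ((PySem.List.pyGetD board 0 []).length : Int) 1) 0 0]
  rw [pv_pair_fold player (fun k => PySem.List.pyGetD (PySem.List.pyGetD board k [])
      (((PySem.List.pyGetD board 1 []).length : Int) - 1 - k) "")
    (PySem.List.pyRange 0 ((PySem.List.pyGetD board 1 []).length : Int) 1) 0 0]
  simp only [zero_add]
  have hcols :
      (PySem.List.pyRange 0 ((PySem.List.pyGetD board 1 []).length : Int) 1).any
        (fun j =>
          ((PySem.List.pyRange 0 ((PySem.List.pyGetD board 0 []).length : Int) 1).foldl
             (fun (d : PySem.Dict Int Int) i => ((PySem.List.pyRange 0 ((PySem.List.pyGetD board 1 []).length : Int) 1).filter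
                 (fun j => PySem.List.pyGetD (PySem.List.pyGetD board i []) j "" == player)).foldl
               (fun d j => d.modify j 0 (· + 1)) d) PySem.Dict.empty).getD j 0 == 2
          && ((PySem.List.pyRange 0 ((PySem.List.pyGetD board 0 []).length : Int) 1).foldl
             (fun (d : PySem.Dict Int Int) i => ((PySem.List.pyRange 0 ((PySem.List.pyGetD board 1 []).length : Int) 1).filter
                 (fun j => !(PySem.List.pyGetD (PySem.List.pyGetD board i []) j "" == player)
                   && PySem.List.pyGetD (PySem.List.pyGetD board i []) j "" == ".")).foldl
               (fun d j => d.modify j 0 (· + 1)) d) PySem.Dict.empty).getD j 0 == 1)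
      = (PySem.List.pyRange 0 ((PySem.List.pyGetD board 1 []).length : Int) 1).any
        (fun j => open_twin_in_col board j player) := by
    apply pv_any_congr
    intro j hj
    rw [PySem.List.pyRange_zero] at hj
    obtain ⟨k, hk, rfl⟩ := List.mem_map.mp hj
    rw [List.mem_range] at hk
    have hklt : ((k : Int)) < ((PySem.List.pyGetD board 1 []).length : Int) := by
      exact_mod_cast (by omega : k < (PySem.List.pyGetD board 1 []).length)
    rw [pv_getD_nested_p, pv_getD_nested_q, PySem.Dict.getD_empty]
    rw [pv_flatMap_count_p board player _ k hklt, pv_flatMap_count_q board player _ k hklt]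
    simp only [zero_add]
    rw [pv_countP_col_p, pv_countP_col_q, pv_cond_eq, pv_col_eq]
  rw [hcols]
  simp only [pv_cond_eq]
  simp only [pv_row_eq, pv_diag1_eq, pv_diag2_eq]

-- ===== VERDICT (by name: the statement is the Claim_ definition above) =====
theorem open_twin_spec : Claim_equal_open_twin := by
  intro board player _ _
  show open_twin board player = open_twin_alt board player
  exact open_twin_eq_alt board player
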